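-- pv_equiv track=rewrite | github.com/Hentaitang/cs61a | practise/pr08/link_use.py | cycle2
-- ===== SOURCE A (Python) =====
-- def cycle2(k, n):
--     """Build an n-element list that cycles among range(k).
--     >>> cycle2(3, 10)
--     [0, 1, 2, 0, 1, 2, 0, 1, 2, 0]
--     """
--     list = []
--     while n > 0:
--         for x in range(k):
--             if n > 0:
--                 list.append(x)
--                 n -= 1
--     return list
-- ===== SOURCE B (Python) =====
-- def cycle2(k, n):
--     """Build an n-element list that cycles among range(k)."""
--     return [i % k for i in range(n)]
-- ===== Notes on version B (the rewrite author's own statement) =====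
-- stated objective: simpler
-- what changed: Replaces A's nested while/for cycling with a decrementing counter by a single comprehension computing each element in closed form as its index modulo k.
import Mathlib
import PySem

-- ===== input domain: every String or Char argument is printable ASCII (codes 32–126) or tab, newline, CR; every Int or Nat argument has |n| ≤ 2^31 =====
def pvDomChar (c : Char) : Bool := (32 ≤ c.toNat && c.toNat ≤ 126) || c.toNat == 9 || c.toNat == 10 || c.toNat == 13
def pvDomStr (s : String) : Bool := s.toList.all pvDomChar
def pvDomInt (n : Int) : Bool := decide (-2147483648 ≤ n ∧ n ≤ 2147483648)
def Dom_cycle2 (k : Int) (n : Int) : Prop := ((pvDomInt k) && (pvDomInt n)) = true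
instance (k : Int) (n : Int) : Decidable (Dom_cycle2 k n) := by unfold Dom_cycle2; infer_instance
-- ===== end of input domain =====

-- B replaces A's nested while/for cycling loops by a single pass computing each element as index % k (simpler decomposition, same cost).


-- ===== PORT A =====
-- 'for x in range(k): if n > 0: list.append(x); n -= 1'
def cycle2Inner (n : Int) (acc : List Int) (xs : List Int) : List Int × Int :=
  match xs with
  | [] => (acc, n)
  | x :: rest =>
      if n > 0 then cycle2Inner (n - 1) (acc ++ [x]) rest
      else cycle2Inner n acc rest

-- 'while n > 0: <inner loop>'; fuel only makes the loop total (Python diverges when k ≤ 0 and n > 0,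
-- outside Pre_); with 1 ≤ k, n.toNat steps always suffice since each pass decrements n at least once.
def cycle2Outer (fuel : Nat) (k : Int) (n : Int) (acc : List Int) : List Int :=
  match fuel with
  | 0 => acc
  | f + 1 =>
      if n > 0 then
        let r := cycle2Inner n acc (PySem.List.pyRange 0 k 1)
        cycle2Outer f k r.2 r.1
      else acc

def cycle2 (k : Int) (n : Int) : List Int := cycle2Outer n.toNat k n []

-- ===== PORT B =====
def cycle2_alt (k : Int) (n : Int) : List Int :=
  (PySem.List.pyRange 0 n 1).map (fun i => PySem.Int.mod i k)

-- ===== PRECONDITION & SPEC =====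
-- Pre_ excludes k ≤ 0 with n > 0: there Python A never terminates (range(k) is empty so n is never
-- decremented) and B raises ZeroDivisionError at k = 0; A returns no value on any excluded input.
def Pre_cycle2 (k : Int) (n : Int) : Prop := n ≤ 0 ∨ 1 ≤ k
instance (k : Int) (n : Int) : Decidable (Pre_cycle2 k n) := by unfold Pre_cycle2; infer_instance
def pvWitness_cycle2 : Int × Int := (3, 10)

def Spec_cycle2 (k : Int) (n : Int) (out : List Int) : Prop := out = cycle2_alt k n
instance (k : Int) (n : Int) (out : List Int) : Decidable (Spec_cycle2 k n out) := by unfold Spec_cycle2; infer_instance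

-- ===== CLAIM (what is proved, stated in full; the proofs are below) =====
def Claim_equal_cycle2 : Prop := ∀ (k : Int) (n : Int), Dom_cycle2 k n → Pre_cycle2 k n → Spec_cycle2 k n (cycle2 k n)

-- ===== LEMMAS AND PROOFS =====

-- Inner loop with enough budget: appends all of xs and decrements n by xs.length.
lemma inner_full (xs : List Int) (acc : List Int) (n : Int) (h : (xs.length : Int) ≤ n) :
    cycle2Inner n acc xs = (acc ++ xs, n - xs.length) := by
  induction xs generalizing acc n with
  | nil => simp [cycle2Inner]
  | cons x rest ih =>
      have hpos : n > 0 := by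
        have : (1 : Int) ≤ (x :: rest).length := by exact_mod_cast Nat.succ_le_succ (Nat.zero_le _)
        omega
      simp only [cycle2Inner, if_pos hpos]
      rw [ih (acc ++ [x]) (n - 1) (by simp at h ⊢; omega)]
      simp
      omega

-- Inner loop with a short budget 0 ≤ n < xs.length: appends the first n elements, ends with n = 0.
lemma inner_partial (xs : List Int) (acc : List Int) (n : Int) (h0 : 0 ≤ n)
    (h : n < (xs.length : Int)) :
    cycle2Inner n acc xs = (acc ++ xs.take n.toNat, 0) := by
  induction xs generalizing acc n with
  | nil => simp at h; omega
  | cons x rest ih =>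
      by_cases hpos : n > 0
      · simp only [cycle2Inner, if_pos hpos]
        rw [ih (acc ++ [x]) (n - 1) (by omega) (by simp at h ⊢; omega)]
        rw [show n.toNat = (n - 1).toNat + 1 from by omega]
        simp [List.take_succ_cons]
      · have hn : n = 0 := by omega
        subst hn
        -- n = 0: the inner loop scans the rest without appending
        clear h ih
        induction rest generalizing acc with
        | nil => simp [cycle2Inner]
        | cons y ys ih2 => simpa [cycle2Inner] using ih2 acc

-- shift lemma: values appended after a full cycle continue the j % k pattern
lemma map_mod_shift (k m : Int) :
    (PySem.List.pyRange k m 1).map (fun j => j % k) =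
      (PySem.List.pyRange 0 (m - k) 1).map (fun j => j % k) := by
  rw [PySem.List.pyRange_one, PySem.List.pyRange_one]
  simp only [List.map_map, sub_zero]
  apply List.map_congr_left
  intro a _
  simp [Function.comp, add_comm k (a : Int)]

lemma map_mod_id (a b k : Int) (h0 : 0 ≤ a) (hb : b ≤ k) :
    (PySem.List.pyRange a b 1).map (fun j => j % k) = PySem.List.pyRange a b 1 := by
  conv_rhs => rw [← List.map_id (PySem.List.pyRange a b 1)]
  apply List.map_congr_left
  intro j hj
  rw [PySem.List.mem_pyRange_one] at hj
  exact Int.emod_eq_of_lt (by omega) (by omega)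

-- Outer loop invariant: with 1 ≤ k and fuel ≥ n, the loop appends exactly [j % k for j in range(n)].
lemma outer_spec (k : Int) (hk : 1 ≤ k) :
    ∀ (f : Nat) (n : Int) (acc : List Int), n ≤ (f : Int) →
      cycle2Outer f k n acc = acc ++ (PySem.List.pyRange 0 n 1).map (fun j => j % k) := by
  intro f
  induction f with
  | zero =>
      intro n acc hn
      rw [cycle2Outer, PySem.List.pyRange_one_eq_nil (by exact_mod_cast hn)]
      simp
  | succ f ih =>
      intro n acc hn
      by_cases hpos : n > 0
      · by_cases hbig : k ≤ n
        · -- a full cycle is appended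
          rw [cycle2Outer, if_pos hpos]
          simp only [inner_full (PySem.List.pyRange 0 k 1) acc n
            (by rw [PySem.List.length_pyRange_one]; omega)]
          rw [PySem.List.length_pyRange_one, sub_zero]
          have hkt : ((k.toNat : Int)) = k := by omega
          rw [hkt]
          rw [ih (n - k) _ (by push_cast at hn ⊢; omega)]
          rw [PySem.List.pyRange_one_append 0 k n (by omega) hbig, List.map_append,
              map_mod_shift k n, map_mod_id 0 k k le_rfl le_rfl, List.append_assoc]
        · -- a partial cycle is appended and n reaches 0
          rw [cycle2Outer, if_pos hpos]
          simp only [inner_partial (PySem.List.pyRange 0 k 1) acc n (by omega)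
            (by rw [PySem.List.length_pyRange_one]; omega)]
          rw [ih 0 _ (by positivity)]
          rw [PySem.List.pyRange_one_eq_nil le_rfl]
          rw [PySem.List.pyRange_one_append 0 n k (by omega) (by omega),
              List.take_append_of_le_length (by rw [PySem.List.length_pyRange_one]; omega)]
          have : (PySem.List.pyRange 0 n 1).take n.toNat = PySem.List.pyRange 0 n 1 := by
            apply List.take_of_length_le
            rw [PySem.List.length_pyRange_one]; omega
          rw [this, map_mod_id 0 n k (by omega) (by omega)]
          simp
      · rw [cycle2Outer, if_neg hpos,
            PySem.List.pyRange_one_eq_nil (by omega)]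
        simp

-- ===== VERDICT (by name: the statement is the Claim_ definition above) =====
theorem cycle2_spec : Claim_equal_cycle2 := by
  intro k n _ hpre
  unfold Spec_cycle2 cycle2 cycle2_alt
  by_cases hk : 1 ≤ k
  · rw [outer_spec k hk n.toNat n [] (by omega)]
    simp only [List.nil_append]
    apply List.map_congr_left
    intro j _
    exact (PySem.Int.mod_eq_emod_of_pos (by omega)).symm
  · have hn : n ≤ 0 := by cases hpre with
      | inl h => exact h
      | inr h => exact absurd h hk
    have : n.toNat = 0 := by omega
    rw [this, cycle2Outer, PySem.List.pyRange_one_eq_nil (by omega)]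
    simp
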